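-- pv_equiv track=rewrite | github.com/kloudy13/HackerRank-Practice | use_of_bisect.py | triplets2
-- ===== SOURCE A (Python) =====
-- def triplets2(a, b, c):
--     a = list(sorted(set(a)))
--     b = list(sorted(set(b)))
--     c = list(sorted(set(c)))
--
--     ai = 0
--     bi = 0
--     ci = 0
--
--     ans = 0
--
--     while bi < len(b):
--         while ai < len(a) and a[ai] <= b[bi]:
--             ai += 1
--
--         while ci < len(c) and c[ci] <= b[bi]:
--             ci += 1
--
--         ans += ai * ci
--         bi += 1
--
--     return ans
-- ===== SOURCE B (Python) =====
-- from bisect import bisect_right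
--
--
-- def triplets2(a, b, c):
--     # Sort+dedupe a and c once, then one independent binary search per distinct b value.
--     sa = sorted(set(a))
--     sc = sorted(set(c))
--     return sum(bisect_right(sa, v) * bisect_right(sc, v) for v in sorted(set(b)))
-- ===== Notes on version B (the rewrite author's own statement) =====
-- stated objective: idiomatic
-- what changed: Replaced A's stateful two-pointer merge sweep (monotone ai/ci indices advanced while-loop by while-loop) with independent bisect_right binary searches into the prebuilt sorted deduped arrays, summed over the distinct b values.
import Mathlib
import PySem

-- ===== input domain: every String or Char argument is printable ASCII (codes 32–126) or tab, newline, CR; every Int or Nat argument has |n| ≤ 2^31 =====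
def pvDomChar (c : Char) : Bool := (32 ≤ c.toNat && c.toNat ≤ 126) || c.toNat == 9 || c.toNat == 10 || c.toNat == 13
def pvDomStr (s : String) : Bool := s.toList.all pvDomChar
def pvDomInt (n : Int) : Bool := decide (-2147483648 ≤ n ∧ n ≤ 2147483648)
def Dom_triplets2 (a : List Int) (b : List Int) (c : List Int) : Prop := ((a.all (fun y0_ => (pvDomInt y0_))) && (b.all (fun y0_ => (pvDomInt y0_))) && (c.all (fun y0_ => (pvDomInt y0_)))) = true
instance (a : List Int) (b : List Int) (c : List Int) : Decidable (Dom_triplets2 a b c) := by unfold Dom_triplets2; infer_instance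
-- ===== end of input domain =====

-- B replaces A's two-pointer merge sweep with an independent bisect_right per distinct b value (idiomatic; same asymptotic cost).

-- ===== PORT A =====
-- list(sorted(set(xs)))
def pvSortedSet (xs : List Int) : List Int :=
  PySem.List.sorted (PySem.Set.ofList xs) (fun x => x)

-- 'while i < len(xs) and xs[i] <= v: i += 1'
def pvAdvance (xs : List Int) (v : Int) (i : Nat) : Nat :=
  if h : i < xs.length then
    if xs[i] ≤ v then pvAdvance xs v (i + 1) else i
  else i
termination_by xs.length - i

-- 'while bi < len(b): … ans += ai * ci; bi += 1' (bi walks b, so recursion on the remaining b)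
def pvLoopA (a c : List Int) : List Int → Nat → Nat → Int → Int
  | [], _, _, ans => ans
  | v :: bs, ai, ci, ans =>
      let ai' := pvAdvance a v ai
      let ci' := pvAdvance c v ci
      pvLoopA a c bs ai' ci' (ans + (ai' : Int) * (ci' : Int))

def triplets2 (a : List Int) (b : List Int) (c : List Int) : Int :=
  pvLoopA (pvSortedSet a) (pvSortedSet c) (pvSortedSet b) 0 0 0

-- ===== PORT B =====
def triplets2_alt (a : List Int) (b : List Int) (c : List Int) : Int :=
  let sa := pvSortedSet a
  let sc := pvSortedSet c
  (pvSortedSet b).foldl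
    (fun acc v => acc + (PySem.List.bisectRight sa v : Int) * (PySem.List.bisectRight sc v : Int)) 0

-- ===== PRECONDITION & SPEC =====
def Spec_triplets2 (a : List Int) (b : List Int) (c : List Int) (out : Int) : Prop := out = triplets2_alt a b c
instance (a : List Int) (b : List Int) (c : List Int) (out : Int) : Decidable (Spec_triplets2 a b c out) := by unfold Spec_triplets2; infer_instance

-- ===== CLAIM (what is proved, stated in full; the proofs are below) =====
def Claim_equal_triplets2 : Prop := ∀ (a : List Int) (b : List Int) (c : List Int), Dom_triplets2 a b c → Spec_triplets2 a b c (triplets2 a b c)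

-- ===== LEMMAS AND PROOFS =====

lemma pvSortedSet_pairwise (xs : List Int) : (pvSortedSet xs).Pairwise (· ≤ ·) := by
  have := PySem.List.sorted_ofList_pairwise_lt xs
  exact this.imp (fun h => le_of_lt h)

lemma bisectRight_mono (xs : List Int) (hs : xs.Pairwise (· ≤ ·)) {v w : Int} (hvw : v ≤ w) :
    PySem.List.bisectRight xs v ≤ PySem.List.bisectRight xs w := by
  obtain ⟨hKv, hv₁, _⟩ := PySem.List.bisectRight_spec xs v hs
  obtain ⟨hKw, _, hw₂⟩ := PySem.List.bisectRight_spec xs w hs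
  by_contra hlt
  rw [not_le] at hlt
  have hjlen : PySem.List.bisectRight xs w < xs.length := lt_of_lt_of_le hlt hKv
  have h1 := hv₁ _ hjlen hlt
  have h2 := hw₂ _ hjlen (le_refl _)
  omega

-- the inner while-loop, started at or below bisectRight, lands exactly on bisectRight
lemma pvAdvance_eq (xs : List Int) (hs : xs.Pairwise (· ≤ ·)) (v : Int) (i : Nat)
    (hi : i ≤ PySem.List.bisectRight xs v) :
    pvAdvance xs v i = PySem.List.bisectRight xs v := by
  obtain ⟨hKlen, hlo, hhi⟩ := PySem.List.bisectRight_spec xs v hs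
  set K := PySem.List.bisectRight xs v with hK
  obtain ⟨k, hk⟩ : ∃ k, K - i = k := ⟨K - i, rfl⟩
  induction k generalizing i with
  | zero =>
      have hKi : K ≤ i := by omega
      rw [pvAdvance]
      by_cases h : i < xs.length
      · rw [dif_pos h, if_neg (not_le.mpr (hhi i h hKi))]; omega
      · rw [dif_neg h]; omega
  | succ k ih =>
      have hiltK : i < K := by omega
      have hilen : i < xs.length := lt_of_lt_of_le hiltK hKlen
      rw [pvAdvance]
      simp only [hilen, dif_pos, hlo i hilen hiltK, if_pos]
      exact ih (i + 1) (by omega) (by omega)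

lemma pvLoopA_eq (a c : List Int) (ha : a.Pairwise (· ≤ ·)) (hc : c.Pairwise (· ≤ ·)) :
    ∀ (bs : List Int) (ai ci : Nat) (ans : Int), bs.Pairwise (· ≤ ·) →
    (∀ v ∈ bs, ai ≤ PySem.List.bisectRight a v ∧ ci ≤ PySem.List.bisectRight c v) →
    pvLoopA a c bs ai ci ans =
      bs.foldl (fun acc v => acc + (PySem.List.bisectRight a v : Int) * (PySem.List.bisectRight c v : Int)) ans := by
  intro bs
  induction bs with
  | nil => intro _ _ _ _ _; rfl
  | cons v bs ih =>
      intro ai ci ans hp hbound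
      have hv := hbound v (List.mem_cons_self)
      have ha' := pvAdvance_eq a ha v ai hv.1
      have hc' := pvAdvance_eq c hc v ci hv.2
      simp only [pvLoopA, ha', hc', List.foldl_cons]
      apply ih _ _ _ (List.Pairwise.of_cons hp)
      intro w hw
      have hvw : v ≤ w := (List.pairwise_cons.mp hp).1 w hw
      exact ⟨bisectRight_mono a ha hvw, bisectRight_mono c hc hvw⟩

-- ===== VERDICT (by name: the statement is the Claim_ definition above) =====
theorem triplets2_spec : Claim_equal_triplets2 := by
  intro a b c _
  unfold Spec_triplets2 triplets2 triplets2_alt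
  exact pvLoopA_eq (pvSortedSet a) (pvSortedSet c)
    (pvSortedSet_pairwise a) (pvSortedSet_pairwise c)
    (pvSortedSet b) 0 0 0 (pvSortedSet_pairwise b)
    (fun v _ => ⟨Nat.zero_le _, Nat.zero_le _⟩)
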